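-- pv_equiv track=rewrite | github.com/ThiagoBauken/botpescompletp | core/rod_maintenance_system.py | _categorize_rods
-- ===== SOURCE A (Python) =====
-- from typing import Optional, Dict, List, Tuple, Set
--
-- def _categorize_rods(rod_status: Dict[int, str]) -> Dict:
--     """Separar varas por categoria"""
--     categories = {
--         'broken_slots': [],
--         'empty_slots': [],
--         'no_bait_slots': [],
--         'with_bait_slots': []
--     }
--
--     for slot, status in rod_status.items():
--         if status == "broken":
--             categories['broken_slots'].append(slot)
--         elif status == "empty":
--             categories['empty_slots'].append(slot)
--         elif status == "without_bait":  # Corrigido: RodViewerBackground usa "without_bait"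
--             categories['no_bait_slots'].append(slot)
--         elif status == "with_bait":
--             categories['with_bait_slots'].append(slot)
--
--     return categories
-- ===== SOURCE B (Python) =====
-- def _categorize_rods(rod_status):
--     """Separar varas por categoria"""
--     items = list(rod_status.items())
--     return {
--         'broken_slots': [slot for slot, status in items if status == "broken"],
--         'empty_slots': [slot for slot, status in items if status == "empty"],
--         'no_bait_slots': [slot for slot, status in items if status == "without_bait"],
--         'with_bait_slots': [slot for slot, status in items if status == "with_bait"],
--     }
-- ===== Notes on version B (the rewrite author's own statement) =====
-- stated objective: simpler
-- what changed: Replaces the single dispatch loop appending into four mutable buckets with four independent filtering comprehensions, one per status category.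
import Mathlib
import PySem

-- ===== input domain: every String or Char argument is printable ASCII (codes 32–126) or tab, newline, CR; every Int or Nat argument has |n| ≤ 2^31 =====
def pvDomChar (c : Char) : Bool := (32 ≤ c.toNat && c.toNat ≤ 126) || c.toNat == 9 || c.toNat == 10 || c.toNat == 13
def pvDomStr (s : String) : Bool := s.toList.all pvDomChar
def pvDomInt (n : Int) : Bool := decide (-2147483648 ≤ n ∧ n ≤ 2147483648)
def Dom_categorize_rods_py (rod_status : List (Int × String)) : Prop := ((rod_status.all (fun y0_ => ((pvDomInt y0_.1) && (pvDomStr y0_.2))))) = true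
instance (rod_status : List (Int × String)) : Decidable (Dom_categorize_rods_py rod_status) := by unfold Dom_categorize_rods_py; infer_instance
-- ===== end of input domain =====

-- B replaces A's single routing loop by four independent filter-and-map passes, one per category (objective: simpler).

-- ===== PORT A =====
-- state = the four bucket lists in categories' insertion order; each branch appends to its bucket
def catStepA (acc : List Int × List Int × List Int × List Int) (p : Int × String) :
    List Int × List Int × List Int × List Int :=
  if p.2 = "broken" then (acc.1 ++ [p.1], acc.2.1, acc.2.2.1, acc.2.2.2)
  else if p.2 = "empty" then (acc.1, acc.2.1 ++ [p.1], acc.2.2.1, acc.2.2.2)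
  else if p.2 = "without_bait" then (acc.1, acc.2.1, acc.2.2.1 ++ [p.1], acc.2.2.2)
  else if p.2 = "with_bait" then (acc.1, acc.2.1, acc.2.2.1, acc.2.2.2 ++ [p.1])
  else acc

def categorize_rods_py (rod_status : List (Int × String)) : List (String × List Int) :=
  let r := rod_status.foldl catStepA ([], [], [], [])
  [("broken_slots", r.1), ("empty_slots", r.2.1), ("no_bait_slots", r.2.2.1), ("with_bait_slots", r.2.2.2)]

-- ===== PORT B =====
def bucket (rod_status : List (Int × String)) (s : String) : List Int :=
  (rod_status.filter (fun p => p.2 = s)).map Prod.fst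

def categorize_rods_py_alt (rod_status : List (Int × String)) : List (String × List Int) :=
  [("broken_slots", bucket rod_status "broken"),
   ("empty_slots", bucket rod_status "empty"),
   ("no_bait_slots", bucket rod_status "without_bait"),
   ("with_bait_slots", bucket rod_status "with_bait")]

-- ===== PRECONDITION & SPEC =====
def Spec_categorize_rods_py (rod_status : List (Int × String)) (out : List (String × List Int)) : Prop := out = categorize_rods_py_alt rod_status
instance (rod_status : List (Int × String)) (out : List (String × List Int)) : Decidable (Spec_categorize_rods_py rod_status out) := by unfold Spec_categorize_rods_py; infer_instance

-- ===== CLAIM =====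
def Claim_equal_categorize_rods_py : Prop := ∀ (rod_status : List (Int × String)), Dom_categorize_rods_py rod_status → Spec_categorize_rods_py rod_status (categorize_rods_py rod_status)

-- ===== LEMMAS AND PROOFS =====
theorem catFold_eq (rs : List (Int × String)) (b e n w : List Int) :
    rs.foldl catStepA (b, e, n, w) =
      (b ++ bucket rs "broken", e ++ bucket rs "empty",
       n ++ bucket rs "without_bait", w ++ bucket rs "with_bait") := by
  induction rs generalizing b e n w with
  | nil => simp [bucket]
  | cons p t ih =>
    simp only [List.foldl_cons, catStepA, bucket, List.filter_cons]
    split_ifs with h1 h2 h3 h4 <;>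
      simp_all [bucket, List.append_assoc]

-- ===== VERDICT =====
theorem categorize_rods_py_spec : Claim_equal_categorize_rods_py := by
  intro rs _
  unfold Spec_categorize_rods_py categorize_rods_py categorize_rods_py_alt
  rw [catFold_eq]
  simp
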